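-- pv_equiv track=rewrite | github.com/Darshan-R-Gupta/Snake_game_A_star | Algo.py | bottom_check
-- ===== SOURCE A (Python) =====
-- def bottom_check(point1, point2, point3, point4, blocks, possible):
--     bottom = False
--     for i in blocks:
--         if i[0] >= point3[0] and i[0] <= point2[0]:
--             if i[1] == point3[1]:
--                 bottom = True
--                 break
--     if bottom:
--         v1 = False
--         v2 = False
--         top = False
--         for i in blocks:
--             if i[0] >= point1[0] and i[0] <= point4[0]:
--                 if i[1] == point1[1]:
--                     top = True
--                     break
--         if top:
--             v1 = True
--
--         right = False
--         for i in blocks: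
--             if i[1] >= point4[1] and i[0] <= point2[1]:
--                 if i[0] == point4[0]:
--                     right = True
--                     break
--         if right:
--             v2 = True
--         return v1, v2
--     else:
--         return False, False
-- ===== SOURCE B (Python) =====
-- def bottom_check(point1, point2, point3, point4, blocks, possible):
--     bottom = top = right = False
--     for x, y in blocks:
--         bottom = bottom or (point3[0] <= x <= point2[0] and y == point3[1])
--         top = top or (point1[0] <= x <= point4[0] and y == point1[1])
--         right = right or (y >= point4[1] and x <= point2[1] and x == point4[0])
--     return (top, right) if bottom else (False, False)
-- ===== Notes on version B (the rewrite author's own statement) =====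
-- stated objective: alternative
-- what changed: B replaces A's three separate early-exit scans over blocks with one fused pass maintaining three OR-accumulated booleans (bottom/top/right), then combines them at the end.
import Mathlib
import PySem

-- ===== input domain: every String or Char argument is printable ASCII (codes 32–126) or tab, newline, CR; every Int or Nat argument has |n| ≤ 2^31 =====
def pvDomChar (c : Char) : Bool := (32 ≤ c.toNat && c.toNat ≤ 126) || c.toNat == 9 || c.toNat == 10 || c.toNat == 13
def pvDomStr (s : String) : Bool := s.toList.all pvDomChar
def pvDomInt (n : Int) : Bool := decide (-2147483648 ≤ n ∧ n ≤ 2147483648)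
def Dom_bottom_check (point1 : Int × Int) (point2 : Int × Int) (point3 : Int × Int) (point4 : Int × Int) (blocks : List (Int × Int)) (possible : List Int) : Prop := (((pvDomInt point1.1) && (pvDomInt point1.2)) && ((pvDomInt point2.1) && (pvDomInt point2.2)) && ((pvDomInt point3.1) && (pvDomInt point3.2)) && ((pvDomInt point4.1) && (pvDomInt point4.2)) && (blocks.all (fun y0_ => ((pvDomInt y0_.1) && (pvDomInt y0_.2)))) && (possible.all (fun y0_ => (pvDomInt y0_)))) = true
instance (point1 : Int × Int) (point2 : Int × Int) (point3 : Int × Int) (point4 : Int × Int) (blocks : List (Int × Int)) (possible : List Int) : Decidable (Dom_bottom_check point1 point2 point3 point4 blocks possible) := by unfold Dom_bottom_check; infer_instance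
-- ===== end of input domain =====

-- B fuses A's three separate early-exit scans over `blocks` into one pass with three OR-accumulated booleans (alternative decomposition; same cost).


-- ===== PORT A =====
-- A's first loop: scan for a bottom block, break on first hit.
def loopBottom (point2 point3 : Int × Int) : List (Int × Int) → Bool
  | [] => false
  | i :: rest =>
    if i.1 ≥ point3.1 ∧ i.1 ≤ point2.1 then
      if i.2 = point3.2 then true else loopBottom point2 point3 rest
    else loopBottom point2 point3 rest

-- A's second loop: scan for a top block, break on first hit.
def loopTop (point1 point4 : Int × Int) : List (Int × Int) → Bool
  | [] => false
  | i :: rest =>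
    if i.1 ≥ point1.1 ∧ i.1 ≤ point4.1 then
      if i.2 = point1.2 then true else loopTop point1 point4 rest
    else loopTop point1 point4 rest

-- A's third loop: scan for a right block (A's original conditions kept as written), break on first hit.
def loopRight (point2 point4 : Int × Int) : List (Int × Int) → Bool
  | [] => false
  | i :: rest =>
    if i.2 ≥ point4.2 ∧ i.1 ≤ point2.2 then
      if i.1 = point4.1 then true else loopRight point2 point4 rest
    else loopRight point2 point4 rest

def bottom_check (point1 : Int × Int) (point2 : Int × Int) (point3 : Int × Int) (point4 : Int × Int) (blocks : List (Int × Int)) (possible : List Int) : Bool × Bool :=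
  let bottom := loopBottom point2 point3 blocks
  if bottom then
    let top := loopTop point1 point4 blocks
    let v1 := if top then true else false
    let right := loopRight point2 point4 blocks
    let v2 := if right then true else false
    (v1, v2)
  else (false, false)

-- ===== PORT B =====
def bottom_check_alt (point1 : Int × Int) (point2 : Int × Int) (point3 : Int × Int) (point4 : Int × Int) (blocks : List (Int × Int)) (possible : List Int) : Bool × Bool :=
  let s := blocks.foldl (fun (s : Bool × Bool × Bool) i =>
    (s.1 || (decide (point3.1 ≤ i.1) && decide (i.1 ≤ point2.1) && decide (i.2 = point3.2)),
     s.2.1 || (decide (point1.1 ≤ i.1) && decide (i.1 ≤ point4.1) && decide (i.2 = point1.2)),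
     s.2.2 || (decide (i.2 ≥ point4.2) && decide (i.1 ≤ point2.2) && decide (i.1 = point4.1))))
    (false, false, false)
  if s.1 then (s.2.1, s.2.2) else (false, false)

-- ===== PRECONDITION & SPEC =====
def Spec_bottom_check (point1 : Int × Int) (point2 : Int × Int) (point3 : Int × Int) (point4 : Int × Int) (blocks : List (Int × Int)) (possible : List Int) (out : Bool × Bool) : Prop := out = bottom_check_alt point1 point2 point3 point4 blocks possible
instance (point1 : Int × Int) (point2 : Int × Int) (point3 : Int × Int) (point4 : Int × Int) (blocks : List (Int × Int)) (possible : List Int) (out : Bool × Bool) : Decidable (Spec_bottom_check point1 point2 point3 point4 blocks possible out) := by unfold Spec_bottom_check; infer_instance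

-- ===== CLAIM (what is proved, stated in full; the proofs are below) =====
def Claim_equal_bottom_check : Prop := ∀ (point1 : Int × Int) (point2 : Int × Int) (point3 : Int × Int) (point4 : Int × Int) (blocks : List (Int × Int)) (possible : List Int), Dom_bottom_check point1 point2 point3 point4 blocks possible → Spec_bottom_check point1 point2 point3 point4 blocks possible (bottom_check point1 point2 point3 point4 blocks possible)

-- ===== LEMMAS AND PROOFS =====

-- Each break-loop of A computes `List.any` of its predicate.
theorem loopBottom_eq_any (point2 point3 : Int × Int) (l : List (Int × Int)) :
    loopBottom point2 point3 l =
      l.any (fun i => decide (point3.1 ≤ i.1) && decide (i.1 ≤ point2.1) && decide (i.2 = point3.2)) := by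
  induction l with
  | nil => rfl
  | cons i rest ih =>
    simp only [loopBottom, List.any_cons, ih]
    by_cases h1 : i.1 ≥ point3.1 ∧ i.1 ≤ point2.1
    · by_cases h2 : i.2 = point3.2 <;> simp [h1.1, h1.2, h2]
    · rw [if_neg h1]
      rcases not_and_or.mp h1 with h | h <;> simp [h]

theorem loopTop_eq_any (point1 point4 : Int × Int) (l : List (Int × Int)) :
    loopTop point1 point4 l =
      l.any (fun i => decide (point1.1 ≤ i.1) && decide (i.1 ≤ point4.1) && decide (i.2 = point1.2)) := by
  induction l with
  | nil => rfl
  | cons i rest ih =>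
    simp only [loopTop, List.any_cons, ih]
    by_cases h1 : i.1 ≥ point1.1 ∧ i.1 ≤ point4.1
    · by_cases h2 : i.2 = point1.2 <;> simp [h1.1, h1.2, h2]
    · rw [if_neg h1]
      rcases not_and_or.mp h1 with h | h <;> simp [h]

theorem loopRight_eq_any (point2 point4 : Int × Int) (l : List (Int × Int)) :
    loopRight point2 point4 l =
      l.any (fun i => decide (i.2 ≥ point4.2) && decide (i.1 ≤ point2.2) && decide (i.1 = point4.1)) := by
  induction l with
  | nil => rfl
  | cons i rest ih =>
    simp only [loopRight, List.any_cons, ih]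
    by_cases h1 : i.2 ≥ point4.2 ∧ i.1 ≤ point2.2
    · by_cases h2 : i.1 = point4.1 <;> simp [h1.1, h1.2, h2]
    · rw [if_neg h1]
      rcases not_and_or.mp h1 with h | h <;> simp [h]

-- B's fused fold computes the three `any`s componentwise.
theorem foldl_or3 {α : Type} (f g h : α → Bool) (l : List α) (a b c : Bool) :
    l.foldl (fun (s : Bool × Bool × Bool) i => (s.1 || f i, s.2.1 || g i, s.2.2 || h i)) (a, b, c)
      = (a || l.any f, b || l.any g, c || l.any h) := by
  induction l generalizing a b c with
  | nil => simp
  | cons i rest ih => simp [List.foldl_cons, ih, Bool.or_assoc]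

-- ===== VERDICT (by name: the statement is the Claim_ definition above) =====
theorem bottom_check_spec : Claim_equal_bottom_check := by
  intro p1 p2 p3 p4 blocks possible _
  show bottom_check p1 p2 p3 p4 blocks possible = bottom_check_alt p1 p2 p3 p4 blocks possible
  unfold bottom_check bottom_check_alt
  rw [foldl_or3, loopBottom_eq_any, loopTop_eq_any, loopRight_eq_any]
  simp only [Bool.false_or]
  split <;> simp
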